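-- pv_equiv track=rewrite | github.com/4oc3p/python_intro | Home20.py | sum_of_pow_three
-- ===== SOURCE A (Python) =====
-- def sum_of_pow_three(a, b):
--     total = 0
--     for i in range(a, b+1):
--         if i == 1:
--             total += 1
--         elif i % 3 == 0:
--             work = i
--             while work % 3 == 0 and i != 0:
--                 work //= 3
--                 if work == 1:
--                     total += i
--     return total
-- ===== SOURCE B (Python) =====
-- def sum_of_pow_three(a, b):
--     total = 0
--     p = 1
--     while p <= b:
--         if p >= a:
--             total += p
--         p *= 3
--     return total
-- ===== Notes on version B (the rewrite author's own statement) =====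
-- stated objective: faster
-- what changed: Instead of scanning every integer in [a,b] and test-dividing it by 3, B enumerates the successive powers of 3 (1, 3, 9, ...) up to b and adds those that are >= a.
import Mathlib
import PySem

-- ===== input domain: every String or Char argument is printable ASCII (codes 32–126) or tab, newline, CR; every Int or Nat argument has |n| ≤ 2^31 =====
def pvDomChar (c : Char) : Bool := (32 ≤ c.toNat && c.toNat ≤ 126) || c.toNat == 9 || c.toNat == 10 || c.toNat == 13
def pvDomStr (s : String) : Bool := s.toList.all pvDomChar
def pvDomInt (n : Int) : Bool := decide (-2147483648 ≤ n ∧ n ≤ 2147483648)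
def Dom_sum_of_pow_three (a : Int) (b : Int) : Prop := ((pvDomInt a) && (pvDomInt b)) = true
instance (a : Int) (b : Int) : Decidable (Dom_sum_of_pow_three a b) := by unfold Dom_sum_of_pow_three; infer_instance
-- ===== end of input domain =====

-- B enumerates the successive powers of 3 up to b instead of scanning all of [a,b]: an asymptotic speed-up, same return value.

-- ===== PORT A =====
-- inner `while work % 3 == 0 and i != 0` loop; fuel = work.natAbs is always enough
-- (each pass divides |work| by 3), so this is exact.
def pvLoopA (i : Int) : Nat → Int → Int → Int
  | 0, _, total => total
  | fuel+1, work, total =>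
    if PySem.Int.mod work 3 = 0 ∧ i ≠ 0 then
      let w := PySem.Int.floordiv work 3
      pvLoopA i fuel w (if w = 1 then total + i else total)
    else total

-- one iteration of A's `for i in range(a, b+1)` body
def pvBodyA (total : Int) (i : Int) : Int :=
  if i = 1 then total + 1
  else if PySem.Int.mod i 3 = 0 then pvLoopA i i.natAbs i total
  else total

def sum_of_pow_three (a : Int) (b : Int) : Int :=
  (PySem.List.pyRange a (b+1) 1).foldl pvBodyA 0

-- ===== PORT B =====
-- `while p <= b:` with p = 1, 3, 9, …; p ≥ 1 is an invariant of the loop, carried as a hypothesis for termination.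
def pvLoopB (a b : Int) (total : Int) : (p : Int) → 1 ≤ p → Int :=
  fun p hp =>
    if h : p ≤ b then
      pvLoopB a b (total + if a ≤ p then p else 0) (3*p) (by omega)
    else total
  termination_by p _ => (b + 1 - p).toNat
  decreasing_by omega

def sum_of_pow_three_alt (a : Int) (b : Int) : Int :=
  pvLoopB a b 0 1 (le_refl 1)

-- ===== PRECONDITION & SPEC =====
def Spec_sum_of_pow_three (a : Int) (b : Int) (out : Int) : Prop := out = sum_of_pow_three_alt a b
instance (a : Int) (b : Int) (out : Int) : Decidable (Spec_sum_of_pow_three a b out) := by unfold Spec_sum_of_pow_three; infer_instance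

-- ===== CLAIM (what is proved, stated in full; the proofs are below) =====
def Claim_equal_sum_of_pow_three : Prop := ∀ (a : Int) (b : Int), Dom_sum_of_pow_three a b → Spec_sum_of_pow_three a b (sum_of_pow_three a b)

-- ===== LEMMAS AND PROOFS =====

-- `i is a power of 3 below 3^40` as a Bool (k = 0, i.e. i = 1, included)
def pvIsPow3 (w : Int) : Bool := (List.range 40).any (fun k => w == (3:Int)^k)
-- same but with exponent ≥ 1 (what A's inner while-loop detects)
def pvIsPow3' (w : Int) : Bool := (List.range 40).any (fun k => 1 ≤ k && w == (3:Int)^k)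

-- the common mathematical value: sum of the powers of 3 lying in [a, b]
def pvS (a b : Int) : Int :=
  ((List.range 40).map (fun k => if a ≤ (3:Int)^k ∧ (3:Int)^k ≤ b then (3:Int)^k else 0)).sum

theorem pvIsPow3_iff (w : Int) : pvIsPow3 w = true ↔ ∃ k, k < 40 ∧ w = (3:Int)^k := by
  simp [pvIsPow3, List.any_eq_true, List.mem_range]

theorem pvIsPow3'_iff (w : Int) : pvIsPow3' w = true ↔ ∃ k, 1 ≤ k ∧ k < 40 ∧ w = (3:Int)^k := by
  simp [pvIsPow3', List.any_eq_true, List.mem_range]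
  tauto

theorem pvLoopA_char (i : Int) (hi : i ≠ 0) :
    ∀ (fuel : Nat) (work total : Int), work ≠ 0 → work.natAbs ≤ fuel → work < 3^40 → -(3^40) < work →
      pvLoopA i fuel work total = total + (if pvIsPow3' work then i else 0) := by
  intro fuel
  induction fuel with
  | zero =>
    intro work total hw hle _ _
    omega
  | succ fuel ih =>
    intro work total hw hle hlt hgt
    rw [pvLoopA]
    by_cases hdvd : PySem.Int.mod work 3 = 0
    · rw [if_pos ⟨hdvd, hi⟩]
      have hdvd' : (3:Int) ∣ work := (PySem.Int.mod_eq_zero_iff_dvd work 3).mp hdvd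
      have hfd : PySem.Int.floordiv work 3 = work / 3 :=
        PySem.Int.floordiv_eq_ediv_of_pos (by norm_num)
      obtain ⟨c, hc⟩ := hdvd'
      have hwc : work / 3 = c := by omega
      have hcne : c ≠ 0 := by omega
      have habs : c.natAbs ≤ fuel := by omega
      have h1 : pvLoopA i fuel (PySem.Int.floordiv work 3)
            (if PySem.Int.floordiv work 3 = 1 then total + i else total)
          = (if PySem.Int.floordiv work 3 = 1 then total + i else total)
            + (if pvIsPow3' c then i else 0) := by
        rw [hfd, hwc]
        exact ih c _ hcne habs (by omega) (by omega)
      rw [h1, hfd, hwc]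
      by_cases hc1 : c = 1
      · subst hc1
        rw [if_pos rfl]
        have h3 : pvIsPow3' work = true := by
          rw [pvIsPow3'_iff]; exact ⟨1, le_refl 1, by norm_num, by omega⟩
        have h4 : pvIsPow3' (1:Int) = false := by decide
        rw [h3, h4]
        simp
      · rw [if_neg hc1]
        -- work = 3*c, c ≠ 1 : pvIsPow3' work ↔ pvIsPow3' c
        by_cases hpc : pvIsPow3' c = true
        · have : pvIsPow3' work = true := by
            rw [pvIsPow3'_iff] at hpc ⊢
            obtain ⟨k, hk1, hk40, hkc⟩ := hpc
            refine ⟨k+1, by omega, ?_, by rw [hc, hkc]; ring⟩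
            by_contra hge
            have hk39 : k + 1 ≥ 40 := by omega
            have : (3:Int)^40 ≤ 3^(k+1) := pow_le_pow_right₀ (by norm_num) (by omega)
            have hwk : work = (3:Int)^(k+1) := by rw [hc, hkc]; ring
            have hpos : (0:Int) < 3^(k+1) := by positivity
            omega
          rw [this, hpc]
        · have hfw : pvIsPow3' work = false := by
            rw [Bool.eq_false_iff]
            intro hcon
            rw [pvIsPow3'_iff] at hcon
            obtain ⟨k, hk1, hk40, hkw⟩ := hcon
            match k, hk1 with
            | 1, _ =>
              apply hc1
              have : work = 3 := by rw [hkw]; norm_num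
              omega
            | (m+2), _ =>
              apply hpc
              rw [pvIsPow3'_iff]
              refine ⟨m+1, by omega, by omega, ?_⟩
              have : work = 3 * (3:Int)^(m+1) := by rw [hkw]; ring
              omega
          simp only [Bool.not_eq_true] at hpc
          rw [hfw, hpc]
    · rw [if_neg (by tauto)]
      have hfw : pvIsPow3' work = false := by
        rw [Bool.eq_false_iff]
        intro hcon
        rw [pvIsPow3'_iff] at hcon
        obtain ⟨k, hk1, hk40, hkw⟩ := hcon
        apply hdvd
        rw [PySem.Int.mod_eq_zero_iff_dvd]
        match k, hk1 with
        | (m+1), _ => exact ⟨3^m, by rw [hkw]; ring⟩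
      rw [hfw]
      simp

theorem pvBodyA_char (total i : Int) (hlt : i < 3^40) (hgt : -(3^40) < i) :
    pvBodyA total i = total + (if pvIsPow3 i then i else 0) := by
  unfold pvBodyA
  by_cases h1 : i = 1
  · subst h1
    rw [if_pos rfl]
    have : pvIsPow3 (1:Int) = true := by decide
    rw [this]; simp
  · rw [if_neg h1]
    by_cases hdvd : PySem.Int.mod i 3 = 0
    · rw [if_pos hdvd]
      by_cases hi0 : i = 0
      · subst hi0
        have : pvIsPow3 (0:Int) = false := by decide
        rw [this]
        simp [pvLoopA]
      · rw [pvLoopA_char i hi0 i.natAbs i total hi0 (le_refl _) hlt hgt]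
        have : pvIsPow3 i = pvIsPow3' i := by
          cases hp : pvIsPow3 i
          · cases hp' : pvIsPow3' i
            · rfl
            · rw [pvIsPow3'_iff] at hp'
              obtain ⟨k, _, hk40, hkw⟩ := hp'
              rw [Bool.eq_false_iff] at hp
              exact absurd ((pvIsPow3_iff i).mpr ⟨k, hk40, hkw⟩) hp
          · cases hp' : pvIsPow3' i
            · rw [pvIsPow3_iff] at hp
              obtain ⟨k, hk40, hkw⟩ := hp
              match k with
              | 0 => exact absurd (by rw [hkw]; norm_num) h1
              | m+1 =>
                rw [Bool.eq_false_iff] at hp'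
                exact absurd ((pvIsPow3'_iff i).mpr ⟨m+1, by omega, hk40, hkw⟩) hp'
            · rfl
        rw [this]
    · rw [if_neg hdvd]
      have : pvIsPow3 i = false := by
        rw [Bool.eq_false_iff]
        intro hcon
        rw [pvIsPow3_iff] at hcon
        obtain ⟨k, hk40, hkw⟩ := hcon
        match k with
        | 0 => exact h1 (by rw [hkw]; norm_num)
        | m+1 =>
          apply hdvd
          rw [PySem.Int.mod_eq_zero_iff_dvd]
          exact ⟨3^m, by rw [hkw]; ring⟩
      rw [this]; simp

-- uniqueness: at most one power of 3 equals b
theorem pv_unique (b : Int) : ∀ n : Nat, n ≤ 40 →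
    ((List.range n).map (fun k => if (3:Int)^k = b then (3:Int)^k else 0)).sum
      = if (∃ k, k < n ∧ (3:Int)^k = b) then b else 0 := by
  intro n
  induction n with
  | zero => intro _; simp
  | succ n ih =>
    intro hn
    rw [List.range_succ, List.map_append, List.sum_append, ih (by omega)]
    by_cases h : (3:Int)^n = b
    · have hnone : ¬ (∃ k, k < n ∧ (3:Int)^k = b) := by
        rintro ⟨k, hk, hkb⟩
        have : (3:Int)^k < 3^n := pow_lt_pow_right₀ (by norm_num) hk
        omega
      rw [if_neg hnone, if_pos ⟨n, by omega, h⟩]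
      simp [h]
    · have : (∃ k, k < n + 1 ∧ (3:Int)^k = b) ↔ (∃ k, k < n ∧ (3:Int)^k = b) := by
        constructor
        · rintro ⟨k, hk, hkb⟩
          refine ⟨k, ?_, hkb⟩
          rcases Nat.lt_succ_iff_lt_or_eq.mp hk with h' | h'
          · exact h'
          · subst h'; exact absurd hkb h
        · rintro ⟨k, hk, hkb⟩; exact ⟨k, by omega, hkb⟩
      simp only [this]
      simp [h]

theorem pvS_step (a b : Int) (hab : a ≤ b) :
    pvS a b = pvS a (b-1) + (if pvIsPow3 b then b else 0) := by
  unfold pvS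
  have hpt : ∀ k : Nat, (if a ≤ (3:Int)^k ∧ (3:Int)^k ≤ b then (3:Int)^k else 0)
      = (if a ≤ (3:Int)^k ∧ (3:Int)^k ≤ b - 1 then (3:Int)^k else 0)
        + (if (3:Int)^k = b then (3:Int)^k else 0) := by
    intro k
    by_cases hkb : (3:Int)^k = b
    · rw [if_pos hkb, if_pos ⟨by omega, by omega⟩, if_neg (by omega)]
      omega
    · rw [if_neg hkb]
      by_cases hle : (3:Int)^k ≤ b - 1
      · by_cases hal : a ≤ (3:Int)^k
        · rw [if_pos ⟨hal, by omega⟩, if_pos ⟨hal, hle⟩]; omega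
        · rw [if_neg (by tauto), if_neg (by tauto)]; omega
      · rw [if_neg (by omega), if_neg (by omega)]; omega
  simp only [hpt]
  rw [PySem.List.sum_map_add_int]
  rw [pv_unique b 40 (le_refl 40)]
  congr 1
  by_cases hp : pvIsPow3 b = true
  · obtain ⟨k, hk, hkb⟩ := (pvIsPow3_iff b).mp hp
    rw [hp, if_pos (show ∃ k, k < 40 ∧ (3:Int)^k = b from ⟨k, hk, hkb.symm⟩)]
    simp
  · have hne : ¬ ∃ k, k < 40 ∧ (3:Int)^k = b := by
      rintro ⟨k, hk, hkb⟩
      exact hp ((pvIsPow3_iff b).mpr ⟨k, hk, hkb.symm⟩)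
    simp only [Bool.not_eq_true] at hp
    rw [hp, if_neg hne]
    simp

theorem pvA_char : ∀ (n : Nat) (a b : Int), (b + 1 - a).toNat = n → b < 3^40 → -(3^40) < a →
    (PySem.List.pyRange a (b+1) 1).foldl pvBodyA 0 = pvS a b := by
  intro n
  induction n with
  | zero =>
    intro a b hn hb ha
    rw [PySem.List.pyRange_one_eq_nil (by omega)]
    unfold pvS
    symm
    simp only [List.foldl_nil]
    apply List.sum_eq_zero
    intro x hx
    simp only [List.mem_map, List.mem_range] at hx
    obtain ⟨k, _, hk⟩ := hx
    rw [← hk, if_neg (by omega)]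
  | succ n ih =>
    intro a b hn hb ha
    have hab : a ≤ b := by omega
    rw [PySem.List.pyRange_one_succ_right hab, List.foldl_append]
    simp only [List.foldl_cons, List.foldl_nil]
    have hb1 : PySem.List.pyRange a b 1 = PySem.List.pyRange a ((b-1)+1) 1 := by ring_nf
    rw [hb1, ih a (b-1) (by omega) (by omega) ha]
    rw [pvBodyA_char (pvS a (b-1)) b hb (by omega)]
    exact (pvS_step a b hab).symm

theorem pvLoopB_char (a b : Int) (hb : b < 3^40) :
    ∀ (n : Nat) (p : Int) (hp : (1:Int) ≤ p) (j : Nat) (total : Int), p = (3:Int)^j → j + n = 40 →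
      pvLoopB a b total p hp
        = total + ((List.range' j n).map (fun k => if a ≤ (3:Int)^k ∧ (3:Int)^k ≤ b then (3:Int)^k else 0)).sum := by
  intro n
  induction n with
  | zero =>
    intro p hp j total hpj hjn
    rw [pvLoopB]
    have : ¬ p ≤ b := by
      rw [hpj]
      have : j = 40 := by omega
      subst this
      omega
    rw [dif_neg this]
    simp
  | succ n ih =>
    intro p hp j total hpj hjn
    rw [pvLoopB]
    by_cases h : p ≤ b
    · rw [dif_pos h]
      rw [ih (3*p) (by omega) (j+1) _ (by rw [hpj]; ring) (by omega)]
      rw [List.range'_succ]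
      simp only [List.map_cons, List.sum_cons]
      have hj : (if a ≤ (3:Int)^j ∧ (3:Int)^j ≤ b then (3:Int)^j else 0) = (if a ≤ p then p else 0) := by
        rw [← hpj]
        by_cases hap : a ≤ p
        · rw [if_pos ⟨hap, h⟩, if_pos hap]
        · rw [if_neg (by tauto), if_neg hap]
      rw [hj]
      ring
    · rw [dif_neg h]
      symm
      have hz : ((List.range' j (n+1)).map (fun k => if a ≤ (3:Int)^k ∧ (3:Int)^k ≤ b then (3:Int)^k else 0)).sum = 0 := by
        apply List.sum_eq_zero
        intro x hx
        simp only [List.mem_map] at hx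
        obtain ⟨k, hk, hkx⟩ := hx
        have hjk : j ≤ k := (List.mem_range'_1.mp hk).1
        have hle : (3:Int)^j ≤ (3:Int)^k := pow_le_pow_right₀ (by norm_num) hjk
        rw [← hkx, if_neg (by omega)]
      rw [hz]
      ring

-- ===== VERDICT (by name: the statement is the Claim_ definition above) =====
theorem sum_of_pow_three_spec : Claim_equal_sum_of_pow_three := by
  intro a b hdom
  unfold Spec_sum_of_pow_three
  unfold Dom_sum_of_pow_three pvDomInt at hdom
  simp only [Bool.and_eq_true, decide_eq_true_eq] at hdom
  have hb : b < 3^40 := by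
    have : (2147483648:Int) < 3^40 := by norm_num
    omega
  have ha : -(3^40) < a := by
    have : (2147483648:Int) < 3^40 := by norm_num
    omega
  unfold sum_of_pow_three sum_of_pow_three_alt
  rw [pvA_char (b + 1 - a).toNat a b rfl hb ha]
  rw [pvLoopB_char a b hb 40 1 (le_refl 1) 0 0 (by norm_num) (by omega)]
  rw [← List.range_eq_range']
  unfold pvS
  ring
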